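-- pv_equiv track=rewrite | github.com/timmoh-king/alx-interview | 0x05-nqueens/0-nqueens.py | put_next_queen
-- ===== SOURCE A (Python) =====
-- def is_valid_position(board, row, col):
--     """check for validity of the queens position
--     """
--     b_size = len(board)
--     if sum(board[row]) or sum([board[i][col] for i in range(b_size)]) != 0:
--         return False
--
--     for i, j in [(1, 1), (-1, -1), (1, -1), (-1, 1)]:
--         r, c = row, col
--         while 0 <= r + i < b_size and 0 <= c + j < b_size:
--             r, c = r + i, c + j
--             if board[r][c]:
--                 return False
--     return True
--
-- def put_next_queen(board, row):
--     """Makes sure a queen is placed at a valid position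
--     """
--     st, end = 0, len(board)
--     if sum(board[row]) == 1:
--         st = board[row].index(1) + 1
--         board[row] = [0 for col in range(end)]
--
--     for col in range(st, end):
--         if is_valid_position(board, row, col):
--             board[row][col] = 1
--             return True
--     return False
-- ===== SOURCE B (Python) =====
-- def put_next_queen(board, row):
--     """Makes sure a queen is placed at a valid position
--
--     Instead of re-scanning the row/column and walking the four diagonal
--     rays for every candidate column, precompute (once, from the board
--     after the row reset) the column sums and the sets of diagonals
--     (keyed by r - c) and anti-diagonals (keyed by r + c) occupied by the
--     other rows; each candidate column is then checked in O(1).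
--     """
--     n = len(board)
--     if sum(board[row]) == 1:
--         st = board[row].index(1) + 1
--         board[row] = [0] * n
--     else:
--         st = 0
--     if sum(board[row]) != 0:
--         return False
--     col_sums = [sum(board[r][c] for r in range(n)) for c in range(n)]
--     diags = {r - c for r in range(n) for c in range(n)
--              if r != row and board[r][c]}
--     antis = {r + c for r in range(n) for c in range(n)
--              if r != row and board[r][c]}
--     for col in range(st, n):
--         if col_sums[col] == 0 and (row - col) not in diags \
--                 and (row + col) not in antis:
--             board[row][col] = 1
--             return True
--     return False
-- ===== Notes on version B (the rewrite author's own statement) =====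
-- stated objective: faster
-- what changed: Replaces the per-candidate column re-sum and the four diagonal ray-walks of is_valid_position by column sums and sets of occupied diagonals (r-c) / anti-diagonals (r+c) precomputed once from the post-reset board excluding the current row, so each candidate column is tested in O(1).
-- outside the precondition, e.g. on put_next_queen([[0, 0, 1], [0, 0, 0], [0, 1, 0]], -2): A returns True, B returns False; on put_next_queen([[0], [0, 0]], 0): A returns True, B raises IndexError
import Mathlib
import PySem

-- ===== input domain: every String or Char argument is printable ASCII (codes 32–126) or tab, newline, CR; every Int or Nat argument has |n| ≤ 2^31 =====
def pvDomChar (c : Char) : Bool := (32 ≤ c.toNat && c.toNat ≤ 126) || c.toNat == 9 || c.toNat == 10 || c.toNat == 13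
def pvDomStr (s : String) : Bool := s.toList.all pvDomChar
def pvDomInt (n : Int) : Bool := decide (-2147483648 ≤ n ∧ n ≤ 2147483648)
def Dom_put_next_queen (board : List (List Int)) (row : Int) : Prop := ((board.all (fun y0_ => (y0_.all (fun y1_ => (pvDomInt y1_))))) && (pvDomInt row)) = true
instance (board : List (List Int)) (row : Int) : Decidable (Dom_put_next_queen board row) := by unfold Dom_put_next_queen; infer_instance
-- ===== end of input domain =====

-- B replaces A's per-candidate column re-sum and four diagonal ray walks by column sums
-- and sets of occupied diagonals/anti-diagonals precomputed once from the post-reset board.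
-- Both Pythons mutate `board` in place identically; the equivalence proved here is about
-- the RETURN value only.

-- ===== PORT A =====
-- board[r][c] (total form; Pre_ keeps all accesses in range in the Python)
def pvAt (board : List (List Int)) (r c : Int) : Int :=
  PySem.List.pyGetD (PySem.List.pyGetD board r []) c 0

-- the `while 0 <= r+i < b_size and 0 <= c+j < b_size` ray walk of is_valid_position;
-- fuel bounds the steps (b_size+1 suffices: r moves by ±1 and must stay inside [0,b_size))
def pvWalk (board : List (List Int)) (n i j : Int) : Int → Int → Nat → Bool
  | _, _, 0 => false
  | r, c, fuel+1 =>
    if 0 ≤ r + i ∧ r + i < n ∧ 0 ≤ c + j ∧ c + j < n then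
      if pvAt board (r + i) (c + j) ≠ 0 then true
      else pvWalk board n i j (r + i) (c + j) fuel
    else false

def is_valid_position (board : List (List Int)) (row col : Int) : Bool :=
  let b_size : Int := (board.length : Int)
  if (PySem.List.pyGetD board row []).sum ≠ 0 ∨
      ((PySem.List.pyRange 0 b_size 1).map (fun i => pvAt board i col)).sum ≠ 0 then
    false
  else
    let fuel := board.length + 1
    if pvWalk board b_size 1 1 row col fuel then false
    else if pvWalk board b_size (-1) (-1) row col fuel then false
    else if pvWalk board b_size 1 (-1) row col fuel then false
    else if pvWalk board b_size (-1) 1 row col fuel then false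
    else true

-- `for col in range(st, end): if is_valid_position(...): return True` / `return False`
def pvLoopA (board : List (List Int)) (row : Int) : List Int → Bool
  | [] => false
  | col :: rest =>
    if is_valid_position board row col then true else pvLoopA board row rest

def put_next_queen (board : List (List Int)) (row : Int) : Bool :=
  let endN : Int := (board.length : Int)
  let brow := PySem.List.pyGetD board row []
  let sb : Int × List (List Int) :=
    if brow.sum = 1 then
      ((((PySem.List.index? brow 1).getD 0 : Nat) : Int) + 1,
       PySem.List.pySetD board row ((PySem.List.pyRange 0 endN 1).map (fun _ => (0 : Int))))
    else (0, board)
  pvLoopA sb.2 row (PySem.List.pyRange sb.1 endN 1)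

-- ===== PORT B =====
-- candidate test: col_sums[col] == 0 and (row-col) not in diags and (row+col) not in antis
def pvTestB (colSums : List Int) (diags antis : PySem.Set Int) (row col : Int) : Bool :=
  (PySem.List.pyGetD colSums col 0 == 0) &&
    !(PySem.Set.contains diags (row - col)) && !(PySem.Set.contains antis (row + col))

def pvLoopB (colSums : List Int) (diags antis : PySem.Set Int) (row : Int) : List Int → Bool
  | [] => false
  | col :: rest =>
    if pvTestB colSums diags antis row col then true
    else pvLoopB colSums diags antis row rest

-- {g(r,c) for r in range(n) for c in range(n) if r != row and board[r][c]}
def pvKeySet (b : List (List Int)) (row : Int) (n : Int) (g : Int → Int → Int) : PySem.Set Int :=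
  PySem.Set.ofList ((PySem.List.pyRange 0 n 1).flatMap (fun r =>
    ((PySem.List.pyRange 0 n 1).filter
        (fun c => decide (r ≠ row) && decide (pvAt b r c ≠ 0))).map (fun c => g r c)))

def put_next_queen_alt (board : List (List Int)) (row : Int) : Bool :=
  let n : Int := (board.length : Int)
  let brow := PySem.List.pyGetD board row []
  let sb : Int × List (List Int) :=
    if brow.sum = 1 then
      ((((PySem.List.index? brow 1).getD 0 : Nat) : Int) + 1,
       PySem.List.pySetD board row (PySem.List.pyRepeat [(0 : Int)] n))
    else (0, board)
  let b := sb.2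
  if (PySem.List.pyGetD b row []).sum ≠ 0 then false
  else
    let colSums := (PySem.List.pyRange 0 n 1).map
      (fun c => ((PySem.List.pyRange 0 n 1).map (fun r => pvAt b r c)).sum)
    let diags := pvKeySet b row n (fun r c => r - c)
    let antis := pvKeySet b row n (fun r c => r + c)
    pvLoopB colSums diags antis row (PySem.List.pyRange sb.1 n 1)

-- ===== PRECONDITION & SPEC =====
-- Pre_ admits exactly the natural inputs on which the Python A returns normally: a row
-- index in [0, len(board)) (a negative in-range row is read via Python's wraparound but
-- the diagonal walks then use the raw negative row, an accident of A's implementation,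
-- and B's natural diagonal keys disagree there — excluded), and either a row whose sum is
-- neither 0 nor 1 (both programs fail fast without touching the other rows), or a board
-- whose rows all have at least len(board) cells (else A's column scan / diagonal walk can
-- raise IndexError or return before reaching a short row while B's eager precompute
-- raises) with no row summing to 1 without a literal 1 (A's .index(1) raises ValueError).
def Pre_put_next_queen (board : List (List Int)) (row : Int) : Prop :=
  0 ≤ row ∧ row < (board.length : Int) ∧
  (((board.getD row.toNat []).sum ≠ 0 ∧ (board.getD row.toNat []).sum ≠ 1) ∨
    ((∀ r ∈ board, board.length ≤ r.length) ∧
     ((board.getD row.toNat []).sum = 1 → (1 : Int) ∈ board.getD row.toNat [])))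

instance (board : List (List Int)) (row : Int) : Decidable (Pre_put_next_queen board row) := by
  unfold Pre_put_next_queen; infer_instance

def pvWitness_put_next_queen : List (List Int) × Int := ([[0, 0], [1, 0]], 0)

def Spec_put_next_queen (board : List (List Int)) (row : Int) (out : Bool) : Prop :=
  out = put_next_queen_alt board row
instance (board : List (List Int)) (row : Int) (out : Bool) : Decidable (Spec_put_next_queen board row out) := by
  unfold Spec_put_next_queen; infer_instance

-- ===== CLAIM (what is proved, stated in full; the proofs are below) =====
def Claim_equal_put_next_queen : Prop := ∀ (board : List (List Int)) (row : Int), Dom_put_next_queen board row → Pre_put_next_queen board row → Spec_put_next_queen board row (put_next_queen board row)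

-- ===== LEMMAS AND PROOFS =====

-- characterisation of the ray walk: it reports a nonzero cell within `fuel` steps iff
-- some step k ≥ 1 stays in bounds the whole way and lands on a nonzero cell
theorem pvWalk_true_iff (b : List (List Int)) (N i j : Int) :
    ∀ (fuel : Nat) (r c : Int),
    pvWalk b N i j r c fuel = true ↔
      ∃ k : Nat, 1 ≤ k ∧ k ≤ fuel ∧
        (∀ m : Nat, 1 ≤ m → m ≤ k →
          0 ≤ r + m * i ∧ r + m * i < N ∧ 0 ≤ c + m * j ∧ c + m * j < N) ∧
        pvAt b (r + k * i) (c + k * j) ≠ 0 := by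
  intro fuel
  induction fuel with
  | zero =>
    intro r c
    simp only [pvWalk]
    constructor
    · intro h; exact absurd h (by simp)
    · rintro ⟨k, hk1, hk0, -⟩; omega
  | succ fuel ih =>
    intro r c
    simp only [pvWalk]
    by_cases hb : 0 ≤ r + i ∧ r + i < N ∧ 0 ≤ c + j ∧ c + j < N
    · rw [if_pos hb]
      by_cases hcell : pvAt b (r + i) (c + j) ≠ 0
      · rw [if_pos hcell]
        simp only [true_iff]
        refine ⟨1, le_refl 1, by omega, ?_, ?_⟩
        · intro m h1 h2
          have hm : m = 1 := by omega
          subst hm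
          simpa using hb
        · simpa using hcell
      · rw [if_neg hcell]
        replace hcell : pvAt b (r + i) (c + j) = 0 := not_not.mp hcell
        rw [ih]
        constructor
        · rintro ⟨k, hk1, hkf, hall, hend⟩
          refine ⟨k + 1, by omega, by omega, ?_, ?_⟩
          · intro m h1 h2
            rcases Nat.eq_or_lt_of_le h1 with h | h
            · subst m; simpa using hb
            · have hm : 1 ≤ m - 1 ∧ m - 1 ≤ k := by omega
              have := hall (m - 1) hm.1 hm.2
              have e : r + (m : Int) * i = r + i + ((m - 1 : Nat) : Int) * i := by
                have : ((m - 1 : Nat) : Int) = (m : Int) - 1 := by omega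
                rw [this]; ring
              have e2 : c + (m : Int) * j = c + j + ((m - 1 : Nat) : Int) * j := by
                have : ((m - 1 : Nat) : Int) = (m : Int) - 1 := by omega
                rw [this]; ring
              rw [e, e2]; exact this
          · have e : r + ((k + 1 : Nat) : Int) * i = r + i + (k : Int) * i := by push_cast; ring
            have e2 : c + ((k + 1 : Nat) : Int) * j = c + j + (k : Int) * j := by push_cast; ring
            rw [e, e2]; exact hend
        · rintro ⟨k, hk1, hkf, hall, hend⟩
          rcases Nat.eq_or_lt_of_le hk1 with h | h
          · exfalso
            apply hend
            have : k = 1 := h.symm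
            subst this
            simpa using hcell
          · refine ⟨k - 1, by omega, by omega, ?_, ?_⟩
            · intro m h1 h2
              have := hall (m + 1) (by omega) (by omega)
              have e : r + i + (m : Int) * i = r + ((m + 1 : Nat) : Int) * i := by push_cast; ring
              have e2 : c + j + (m : Int) * j = c + ((m + 1 : Nat) : Int) * j := by push_cast; ring
              rw [e, e2]; exact this
            · have e : r + i + ((k - 1 : Nat) : Int) * i = r + (k : Int) * i := by
                have : ((k - 1 : Nat) : Int) = (k : Int) - 1 := by omega
                rw [this]; ring
              have e2 : c + j + ((k - 1 : Nat) : Int) * j = c + (k : Int) * j := by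
                have : ((k - 1 : Nat) : Int) = (k : Int) - 1 := by omega
                rw [this]; ring
              rw [e, e2]; exact hend
    · rw [if_neg hb]
      constructor
      · intro h; exact absurd h (by simp)
      · rintro ⟨k, hk1, hkf, hall, -⟩
        exfalso
        exact hb (by simpa using hall 1 le_rfl hk1)

theorem ray_pp (b : List (List Int)) (N : Int) (fuel : Nat) (r c : Int)
    (hr : 0 ≤ r) (_hrN : r < N) (hc : 0 ≤ c) (hfuel : N ≤ (fuel : Int)) :
    pvWalk b N 1 1 r c fuel = true ↔
      ∃ k : Nat, 1 ≤ k ∧ r + k < N ∧ c + k < N ∧ pvAt b (r + k) (c + k) ≠ 0 := by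
  rw [pvWalk_true_iff]
  constructor
  · rintro ⟨k, hk1, hkf, hall, hend⟩
    have := hall k hk1 le_rfl
    simp only [mul_one] at this hend
    exact ⟨k, hk1, this.2.1, this.2.2.2, hend⟩
  · rintro ⟨k, hk1, hkN, hcN, hend⟩
    refine ⟨k, hk1, by omega, ?_, by simpa using hend⟩
    intro m h1 h2
    simp only [mul_one]
    omega

theorem ray_mm (b : List (List Int)) (N : Int) (fuel : Nat) (r c : Int)
    (_hrN : r < N) (hcN : c < N) (hfuel : N ≤ (fuel : Int)) :
    pvWalk b N (-1) (-1) r c fuel = true ↔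
      ∃ k : Nat, 1 ≤ k ∧ 0 ≤ r - k ∧ 0 ≤ c - k ∧ pvAt b (r - k) (c - k) ≠ 0 := by
  rw [pvWalk_true_iff]
  constructor
  · rintro ⟨k, hk1, hkf, hall, hend⟩
    have := hall k hk1 le_rfl
    simp only [mul_neg_one, ← sub_eq_add_neg] at this hend
    exact ⟨k, hk1, this.1, this.2.2.1, hend⟩
  · rintro ⟨k, hk1, hk2, hk3, hend⟩
    refine ⟨k, hk1, by omega, ?_, ?_⟩
    · intro m h1 h2
      simp only [mul_neg_one, ← sub_eq_add_neg]
      omega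
    · simpa [mul_neg_one, ← sub_eq_add_neg] using hend

theorem ray_pm (b : List (List Int)) (N : Int) (fuel : Nat) (r c : Int)
    (hr : 0 ≤ r) (_hrN : r < N) (hcN : c < N) (hfuel : N ≤ (fuel : Int)) :
    pvWalk b N 1 (-1) r c fuel = true ↔
      ∃ k : Nat, 1 ≤ k ∧ r + k < N ∧ 0 ≤ c - k ∧ pvAt b (r + k) (c - k) ≠ 0 := by
  rw [pvWalk_true_iff]
  constructor
  · rintro ⟨k, hk1, hkf, hall, hend⟩
    have := hall k hk1 le_rfl
    simp only [mul_one, mul_neg_one, ← sub_eq_add_neg] at this hend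
    exact ⟨k, hk1, this.2.1, this.2.2.1, hend⟩
  · rintro ⟨k, hk1, hk2, hk3, hend⟩
    refine ⟨k, hk1, by omega, ?_, ?_⟩
    · intro m h1 h2
      simp only [mul_one, mul_neg_one, ← sub_eq_add_neg]
      omega
    · simpa [mul_one, mul_neg_one, ← sub_eq_add_neg] using hend

theorem ray_mp (b : List (List Int)) (N : Int) (fuel : Nat) (r c : Int)
    (hrN : r < N) (hc : 0 ≤ c) (_hcN : c < N) (hfuel : N ≤ (fuel : Int)) :
    pvWalk b N (-1) 1 r c fuel = true ↔
      ∃ k : Nat, 1 ≤ k ∧ 0 ≤ r - k ∧ c + k < N ∧ pvAt b (r - k) (c + k) ≠ 0 := by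
  rw [pvWalk_true_iff]
  constructor
  · rintro ⟨k, hk1, hkf, hall, hend⟩
    have := hall k hk1 le_rfl
    simp only [mul_one, mul_neg_one, ← sub_eq_add_neg] at this hend
    exact ⟨k, hk1, this.1, this.2.2.2, hend⟩
  · rintro ⟨k, hk1, hk2, hk3, hend⟩
    refine ⟨k, hk1, by omega, ?_, ?_⟩
    · intro m h1 h2
      simp only [mul_one, mul_neg_one, ← sub_eq_add_neg]
      omega
    · simpa [mul_one, mul_neg_one, ← sub_eq_add_neg] using hend

theorem mem_pvKeySet (b : List (List Int)) (row N : Int) (g : Int → Int → Int) (x : Int) :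
    x ∈ pvKeySet b row N g ↔
      ∃ r c : Int, (0 ≤ r ∧ r < N) ∧ (0 ≤ c ∧ c < N) ∧ r ≠ row ∧ pvAt b r c ≠ 0 ∧ g r c = x := by
  unfold pvKeySet
  rw [PySem.Set.mem_ofList]
  simp only [List.mem_flatMap, List.mem_map, List.mem_filter, PySem.List.mem_pyRange_one,
    Bool.and_eq_true, decide_eq_true_eq]
  constructor
  · rintro ⟨r, ⟨hr0, hrN⟩, c, ⟨⟨hc0, hcN⟩, hne, hcell⟩, hx⟩
    exact ⟨r, c, ⟨hr0, hrN⟩, ⟨hc0, hcN⟩, hne, hcell, hx⟩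
  · rintro ⟨r, c, ⟨hr0, hrN⟩, ⟨hc0, hcN⟩, hne, hcell, hx⟩
    exact ⟨r, ⟨hr0, hrN⟩, c, ⟨⟨hc0, hcN⟩, hne, hcell⟩, hx⟩

-- the two "diagonal" rays of A see exactly the occupied diagonal keys r-c of B
theorem diag_iff (b : List (List Int)) (N : Int) (fuel : Nat) (row col : Int)
    (hr : 0 ≤ row) (hrN : row < N) (hc : 0 ≤ col) (hcN : col < N) (hfuel : N ≤ (fuel : Int)) :
    (pvWalk b N 1 1 row col fuel || pvWalk b N (-1) (-1) row col fuel) = true ↔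
      (row - col) ∈ pvKeySet b row N (fun r c => r - c) := by
  rw [mem_pvKeySet, Bool.or_eq_true, ray_pp b N fuel row col hr hrN hc hfuel,
    ray_mm b N fuel row col hrN hcN hfuel]
  constructor
  · rintro (⟨k, hk1, h1, h2, hcell⟩ | ⟨k, hk1, h1, h2, hcell⟩)
    · exact ⟨row + k, col + k, by omega, by omega, by omega, hcell, by ring⟩
    · exact ⟨row - k, col - k, by omega, by omega, by omega, hcell, by ring⟩
  · rintro ⟨r, c, ⟨hr0, hrN'⟩, ⟨hc0, hcN'⟩, hne, hcell, hx⟩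
    rcases lt_or_gt_of_ne hne with h | h
    · right
      refine ⟨(row - r).toNat, by omega, by omega, by omega, ?_⟩
      have e1 : row - ((row - r).toNat : Int) = r := by omega
      have e2 : col - ((row - r).toNat : Int) = c := by omega
      rw [e1, e2]; exact hcell
    · left
      refine ⟨(r - row).toNat, by omega, by omega, by omega, ?_⟩
      have e1 : row + ((r - row).toNat : Int) = r := by omega
      have e2 : col + ((r - row).toNat : Int) = c := by omega
      rw [e1, e2]; exact hcell

-- the two "anti-diagonal" rays of A see exactly the occupied keys r+c of B
theorem anti_iff (b : List (List Int)) (N : Int) (fuel : Nat) (row col : Int)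
    (hr : 0 ≤ row) (hrN : row < N) (hc : 0 ≤ col) (hcN : col < N) (hfuel : N ≤ (fuel : Int)) :
    (pvWalk b N 1 (-1) row col fuel || pvWalk b N (-1) 1 row col fuel) = true ↔
      (row + col) ∈ pvKeySet b row N (fun r c => r + c) := by
  rw [mem_pvKeySet, Bool.or_eq_true, ray_pm b N fuel row col hr hrN hcN hfuel,
    ray_mp b N fuel row col hrN hc hcN hfuel]
  constructor
  · rintro (⟨k, hk1, h1, h2, hcell⟩ | ⟨k, hk1, h1, h2, hcell⟩)
    · exact ⟨row + k, col - k, by omega, by omega, by omega, hcell, by ring⟩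
    · exact ⟨row - k, col + k, by omega, by omega, by omega, hcell, by ring⟩
  · rintro ⟨r, c, ⟨hr0, hrN'⟩, ⟨hc0, hcN'⟩, hne, hcell, hx⟩
    rcases lt_or_gt_of_ne hne with h | h
    · right
      refine ⟨(row - r).toNat, by omega, by omega, by omega, ?_⟩
      have e1 : row - ((row - r).toNat : Int) = r := by omega
      have e2 : col + ((row - r).toNat : Int) = c := by omega
      rw [e1, e2]; exact hcell
    · left
      refine ⟨(r - row).toNat, by omega, by omega, by omega, ?_⟩
      have e1 : row + ((r - row).toNat : Int) = r := by omega
      have e2 : col - ((r - row).toNat : Int) = c := by omega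
      rw [e1, e2]; exact hcell

-- A's full validity check equals B's O(1) candidate test at every in-range column
theorem pointwise (b : List (List Int)) (row col : Int)
    (hr : 0 ≤ row) (hrN : row < (b.length : Int))
    (hc : 0 ≤ col) (hcN : col < (b.length : Int))
    (hs : (PySem.List.pyGetD b row []).sum = 0) :
    is_valid_position b row col =
      pvTestB
        ((PySem.List.pyRange 0 (b.length : Int) 1).map
          (fun c => ((PySem.List.pyRange 0 (b.length : Int) 1).map (fun r => pvAt b r c)).sum))
        (pvKeySet b row (b.length : Int) (fun r c => r - c))
        (pvKeySet b row (b.length : Int) (fun r c => r + c)) row col := by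
  have hfuel : (b.length : Int) ≤ ((b.length + 1 : Nat) : Int) := by push_cast; omega
  unfold is_valid_position pvTestB
  rw [PySem.List.pyGetD_map_pyRange_of_nonneg _ _ _ _ hc hcN]
  simp only [hs, ne_eq, not_true_eq_false, false_or]
  by_cases hcs : ((PySem.List.pyRange 0 (b.length : Int) 1).map (fun r => pvAt b r col)).sum = 0
  · rw [if_neg (by simpa using hcs)]
    have hd := diag_iff b (b.length : Int) (b.length + 1) row col hr hrN hc hcN hfuel
    have ha := anti_iff b (b.length : Int) (b.length + 1) row col hr hrN hc hcN hfuel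
    rw [← PySem.Set.contains_iff] at hd ha
    simp only [Bool.or_eq_true] at hd ha
    cases h11 : pvWalk b (b.length : Int) 1 1 row col (b.length + 1) <;>
      cases hmm : pvWalk b (b.length : Int) (-1) (-1) row col (b.length + 1) <;>
        cases hpm : pvWalk b (b.length : Int) 1 (-1) row col (b.length + 1) <;>
          cases hmp : pvWalk b (b.length : Int) (-1) 1 row col (b.length + 1) <;>
            simp_all
  · rw [if_pos (by simpa using hcs)]
    simp [hcs]

theorem loopA_false (b : List (List Int)) (row : Int)
    (hs : (PySem.List.pyGetD b row []).sum ≠ 0) :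
    ∀ l : List Int, pvLoopA b row l = false := by
  intro l
  induction l with
  | nil => rfl
  | cons col rest ih =>
    have hv : is_valid_position b row col = false := by
      unfold is_valid_position
      rw [if_pos (Or.inl hs)]
    simp [pvLoopA, hv, ih]

theorem loop_congr (b : List (List Int)) (colSums : List Int) (diags antis : PySem.Set Int)
    (row : Int) (l : List Int)
    (h : ∀ col ∈ l, is_valid_position b row col = pvTestB colSums diags antis row col) :
    pvLoopA b row l = pvLoopB colSums diags antis row l := by
  induction l with
  | nil => rfl
  | cons col rest ih =>
    simp only [pvLoopA, pvLoopB, h col (List.mem_cons_self ..)]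
    by_cases ht : pvTestB colSums diags antis row col
    · simp [ht]
    · simp only [ht, Bool.false_eq_true, if_false]
      exact ih (fun c hc => h c (List.mem_cons_of_mem _ hc))

-- A's reset list [0 for col in range(end)] is B's [0] * n
theorem reset_list_eq (N : Int) :
    (PySem.List.pyRange 0 N 1).map (fun _ => (0 : Int)) = PySem.List.pyRepeat [(0 : Int)] N := by
  rw [PySem.List.pyRepeat_singleton, PySem.List.pyRange_one]
  simp only [List.map_map, Function.comp_def]
  rw [List.map_const', List.length_range]
  norm_num

theorem main_eq (board : List (List Int)) (row : Int)
    (h0 : 0 ≤ row) (hN : row < (board.length : Int)) :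
    put_next_queen board row = put_next_queen_alt board row := by
  unfold put_next_queen put_next_queen_alt
  simp only []
  rw [reset_list_eq]
  set brow := PySem.List.pyGetD board row [] with hbrow
  set sb : Int × List (List Int) :=
    (if brow.sum = 1 then
      ((((PySem.List.index? brow 1).getD 0 : Nat) : Int) + 1,
       PySem.List.pySetD board row (PySem.List.pyRepeat [(0 : Int)] (board.length : Int)))
    else (0, board)) with hsb
  have hlen : sb.2.length = board.length := by
    rw [hsb]
    split
    · simp [PySem.List.length_pySetD]
    · rfl
  have hst : 0 ≤ sb.1 := by
    rw [hsb]
    split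
    · simp; omega
    · simp
  by_cases hs : (PySem.List.pyGetD sb.2 row []).sum = 0
  · rw [if_neg (by simpa using hs)]
    have hcast : (board.length : Int) = (sb.2.length : Int) := by rw [hlen]
    rw [hcast]
    apply loop_congr
    intro col hcol
    rw [PySem.List.mem_pyRange_one] at hcol
    exact pointwise sb.2 row col h0 (by rw [hlen]; exact hN) (le_trans hst hcol.1) hcol.2 hs
  · rw [if_pos (by simpa using hs)]
    exact loopA_false sb.2 row hs _

-- ===== VERDICT (by name: the statement is the Claim_ definition above) =====
theorem put_next_queen_spec : Claim_equal_put_next_queen := by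
  intro board row _hdom hpre
  exact main_eq board row hpre.1 hpre.2.1
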